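-- pv_equiv track=rewrite | github.com/sdsmart/Text_Analytics_Homework_4 | documents/7.py | xml_tokenize
-- ===== SOURCE A (Python) =====
-- def xml_tokenize(xml):
-- 	xml_tokens = []
-- 	token = ""
--
-- 	# loop through xml and find full "tokens"
-- 	for char in xml:
-- 		if char == ">":
-- 			token+=">"
-- 			xml_tokens.append(token)
-- 			token = ""
-- 		elif char == "<" and len(token) > 0:
-- 			xml_tokens.append(token)
-- 			token = "<"
-- 		else:
-- 			token += char
-- 	xml_tokens.append(token)
--
-- 	#remove any tokens that are only whitespace
-- 	return [x for x in xml_tokens if len(x.replace("\n",'').replace("\t",''))>0]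
-- ===== SOURCE B (Python) =====
-- import re
--
-- _TOKEN_RE = re.compile(r'<?[^<>]*>|<[^<>]*|[^<>]+')
--
-- def xml_tokenize(xml):
--     tokens = _TOKEN_RE.findall(xml)
--     return [t for t in tokens if len(t.replace("\n", '').replace("\t", '')) > 0]
-- ===== Notes on version B (the rewrite author's own statement) =====
-- stated objective: idiomatic
-- what changed: Replaced A's char-by-char accumulator loop with a single regex tokenizer (re.findall with three alternatives: segment ending in '>', unclosed '<'-fragment, plain text run) followed by the identical whitespace filter.
import Mathlib
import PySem

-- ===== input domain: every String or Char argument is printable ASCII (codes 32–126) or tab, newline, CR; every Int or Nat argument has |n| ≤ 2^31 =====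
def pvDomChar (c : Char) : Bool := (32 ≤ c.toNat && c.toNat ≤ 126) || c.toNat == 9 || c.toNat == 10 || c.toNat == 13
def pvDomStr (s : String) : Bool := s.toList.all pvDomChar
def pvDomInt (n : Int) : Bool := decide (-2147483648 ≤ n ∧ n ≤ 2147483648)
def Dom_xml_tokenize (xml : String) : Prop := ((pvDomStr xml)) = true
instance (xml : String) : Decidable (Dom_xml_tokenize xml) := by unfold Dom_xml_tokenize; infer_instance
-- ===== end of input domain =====

-- B replaces A's char-by-char accumulator loop with a regex-style tokenizer (one match per token);
-- objective: idiomatic/alternative, same return value on every input.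

-- the whitespace-only filter shared by both programs: len(x.replace("\n",'').replace("\t",'')) > 0
def keepTok (s : String) : Bool := decide (0 < PySem.Str.len (PySem.Str.replace (PySem.Str.replace s "\n" "") "\t" ""))

-- ===== PORT A =====
-- A's loop state: (xml_tokens, token); the running token is carried as List Char (String ↔ List Char).
def xmlStepA (st : List String × List Char) (c : Char) : List String × List Char :=
  if c = '>' then (st.1 ++ [String.ofList (st.2 ++ ['>'])], [])
  else if c = '<' ∧ st.2.length > 0 then (st.1 ++ [String.ofList st.2], ['<'])
  else (st.1, st.2 ++ [c])

def xml_tokenize (xml : String) : List String :=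
  ((xml.toList.foldl xmlStepA ([], [])).1
    ++ [String.ofList (xml.toList.foldl xmlStepA ([], [])).2]).filter keepTok

-- ===== PORT B =====
-- Source B uses re.findall(r'<?[^<>]*>|<[^<>]*|[^<>]+', xml); ported by hand, step for step:
-- at each position try alt1 '<?[^<>]*>', then alt2 '<[^<>]*', then alt3 '[^<>]+' (exact for this
-- pattern: the [^<>]* runs are maximal, and backtracking '<?'/shorter runs can never help, since
-- a shorter run would require '>' at a position known to hold a non-'>' character).
def pchar (c : Char) : Bool := !(c == '<' || c == '>')

def bTok : List Char → List (List Char)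
  | [] => []
  | c :: rest =>
    if c = '<' then
      match _h : rest.dropWhile pchar with
      | '>' :: rem' => ('<' :: (rest.takeWhile pchar ++ ['>'])) :: bTok rem'   -- alt1 with leading '<'
      | rem => ('<' :: rest.takeWhile pchar) :: bTok rem                       -- alt2
    else if c = '>' then
      ['>'] :: bTok rest                                                       -- alt1 with empty run
    else
      match _h : rest.dropWhile pchar with
      | '>' :: rem' => ((c :: rest.takeWhile pchar) ++ ['>']) :: bTok rem'     -- alt1, no leading '<'
      | rem => (c :: rest.takeWhile pchar) :: bTok rem                         -- alt3
termination_by cs => cs.length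
decreasing_by
  all_goals simp only [List.length_cons]
  · have := List.length_dropWhile_le pchar rest
    rw [_h] at this; simp at this; omega
  · have := List.length_dropWhile_le pchar rest
    rw [_h] at this; omega
  · omega
  · have := List.length_dropWhile_le pchar rest
    rw [_h] at this; simp at this; omega
  · have := List.length_dropWhile_le pchar rest
    rw [_h] at this; omega

def xml_tokenize_alt (xml : String) : List String :=
  ((bTok xml.toList).map String.ofList).filter keepTok

-- ===== PRECONDITION & SPEC =====
def Spec_xml_tokenize (xml : String) (out : List String) : Prop := out = xml_tokenize_alt xml
instance (xml : String) (out : List String) : Decidable (Spec_xml_tokenize xml out) := by unfold Spec_xml_tokenize; infer_instance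

-- ===== CLAIM (what is proved, stated in full; the proofs are below) =====
def Claim_equal_xml_tokenize : Prop := ∀ (xml : String), Dom_xml_tokenize xml → Spec_xml_tokenize xml (xml_tokenize xml)

-- ===== LEMMAS AND PROOFS =====

-- A's token stream written as direct recursion over the remaining characters
def aRun : List Char → List Char → List (List Char)
  | token, [] => [token]
  | token, c :: rest =>
    if c = '>' then (token ++ ['>']) :: aRun [] rest
    else if c = '<' ∧ token ≠ [] then token :: aRun ['<'] rest
    else aRun (token ++ [c]) rest

lemma foldl_aRun (cs : List Char) (acc : List String) (token : List Char) :
    (cs.foldl xmlStepA (acc, token)).1 ++ [String.ofList (cs.foldl xmlStepA (acc, token)).2]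
      = acc ++ (aRun token cs).map String.ofList := by
  induction cs generalizing acc token with
  | nil => simp [aRun]
  | cons c rest ih =>
    simp only [List.foldl_cons, xmlStepA, aRun]
    by_cases h1 : c = '>'
    · simp [h1, ih]
    · by_cases h2 : c = '<' ∧ token ≠ []
      · have : c = '<' ∧ token.length > 0 := ⟨h2.1, by cases token <;> simp_all⟩
        simp [this, h2, ih]
      · have h2' : ¬ (c = '<' ∧ token.length > 0) := by
          intro hc; exact h2 ⟨hc.1, by intro he; simp [he] at hc⟩
        simp [h1, h2', h2, ih]

-- the invariant A's running token satisfies: no '>', and '<' at most as first character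
def invTok (token : List Char) : Prop :=
  token.all pchar = true ∨ (token.head? = some '<' ∧ token.tail.all pchar = true)

lemma takeWhile_all_append {run : List Char} {x : Char} {xs : List Char}
    (h : run.all pchar = true) (hx : pchar x = false) :
    ((run ++ x :: xs).takeWhile pchar) = run := by
  induction run with
  | nil => simp [hx]
  | cons a l ih =>
    simp only [List.all_cons, Bool.and_eq_true] at h
    simp [h.1, ih h.2]

lemma dropWhile_all_append {run : List Char} {x : Char} {xs : List Char}
    (h : run.all pchar = true) (hx : pchar x = false) :
    ((run ++ x :: xs).dropWhile pchar) = x :: xs := by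
  induction run with
  | nil => simp [hx]
  | cons a l ih =>
    simp only [List.all_cons, Bool.and_eq_true] at h
    simp [h.1, ih h.2]

lemma dropWhile_all {run : List Char} (h : run.all pchar = true) :
    run.dropWhile pchar = [] := by
  induction run with
  | nil => simp
  | cons a l ih =>
    simp only [List.all_cons, Bool.and_eq_true] at h
    simp [h.1, ih h.2]

lemma takeWhile_all {run : List Char} (h : run.all pchar = true) :
    run.takeWhile pchar = run := by
  induction run with
  | nil => simp
  | cons a l ih =>
    simp only [List.all_cons, Bool.and_eq_true] at h
    simp [h.1, ih h.2]

lemma bTok_nil : bTok [] = [] := by rw [bTok]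

lemma pchar_gt : pchar '>' = false := by decide
lemma pchar_lt : pchar '<' = false := by decide

lemma bTok_single {token : List Char} (h : invTok token) (hne : token ≠ []) :
    bTok token = [token] := by
  cases token with
  | nil => exact absurd rfl hne
  | cons d ds =>
    rcases h with h | h
    · simp only [List.all_cons, Bool.and_eq_true] at h
      have hd : pchar d = true := h.1
      have h1 : d ≠ '<' := by intro he; simp [he, pchar] at hd
      have h2 : d ≠ '>' := by intro he; simp [he, pchar] at hd
      rw [bTok.eq_def]
      simp only [h1, h2, if_false]
      split
      · rename_i rem' heq
        rw [dropWhile_all h.2] at heq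
        simp at heq
      · rw [dropWhile_all h.2, takeWhile_all h.2, bTok_nil]
    · simp only [List.head?_cons, Option.some.injEq, List.tail_cons] at h
      obtain ⟨hd, hds⟩ := h
      subst hd
      rw [bTok.eq_def]
      simp only [reduceIte]
      split
      · rename_i rem' heq
        rw [dropWhile_all hds] at heq
        simp at heq
      · rw [dropWhile_all hds, takeWhile_all hds, bTok_nil]

lemma bTok_flush_gt {token : List Char} (h : invTok token) (rest : List Char) :
    bTok (token ++ '>' :: rest) = (token ++ ['>']) :: bTok rest := by
  cases token with
  | nil =>
    rw [List.nil_append, bTok.eq_def]; simp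
  | cons d ds =>
    rcases h with h | h
    · simp only [List.all_cons, Bool.and_eq_true] at h
      have hd : pchar d = true := h.1
      have h1 : d ≠ '<' := by intro he; simp [he, pchar] at hd
      have h2 : d ≠ '>' := by intro he; simp [he, pchar] at hd
      rw [List.cons_append, bTok.eq_def]
      simp only [h1, h2, if_false]
      split
      · rename_i rem' heq
        rw [dropWhile_all_append h.2 pchar_gt] at heq
        injection heq with _ h3
        rw [takeWhile_all_append h.2 pchar_gt, h3]
      · rename_i hnc
        exact absurd (dropWhile_all_append h.2 pchar_gt) (fun he => hnc rest he)
    · simp only [List.head?_cons, Option.some.injEq, List.tail_cons] at h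
      obtain ⟨hd, hds⟩ := h
      subst hd
      rw [List.cons_append, bTok.eq_def]
      simp only [reduceIte]
      split
      · rename_i rem' heq
        rw [dropWhile_all_append hds pchar_gt] at heq
        injection heq with _ h3
        rw [takeWhile_all_append hds pchar_gt, h3]
        simp
      · rename_i hnc
        exact absurd (dropWhile_all_append hds pchar_gt) (fun he => hnc rest he)

lemma bTok_flush_lt {token : List Char} (h : invTok token) (hne : token ≠ []) (rest : List Char) :
    bTok (token ++ '<' :: rest) = token :: bTok ('<' :: rest) := by
  cases token with
  | nil => exact absurd rfl hne
  | cons d ds =>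
    rcases h with h | h
    · simp only [List.all_cons, Bool.and_eq_true] at h
      have hd : pchar d = true := h.1
      have h1 : d ≠ '<' := by intro he; simp [he, pchar] at hd
      have h2 : d ≠ '>' := by intro he; simp [he, pchar] at hd
      rw [List.cons_append, bTok.eq_def]
      simp only [h1, h2, if_false]
      split
      · rename_i rem' heq
        rw [dropWhile_all_append h.2 pchar_lt] at heq
        simp at heq
      · rw [dropWhile_all_append h.2 pchar_lt, takeWhile_all_append h.2 pchar_lt]
    · simp only [List.head?_cons, Option.some.injEq, List.tail_cons] at h
      obtain ⟨hd, hds⟩ := h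
      subst hd
      rw [List.cons_append, bTok.eq_def]
      simp only [reduceIte]
      split
      · rename_i rem' heq
        rw [dropWhile_all_append hds pchar_lt] at heq
        simp at heq
      · rw [dropWhile_all_append hds pchar_lt, takeWhile_all_append hds pchar_lt]

-- main correspondence: B's tokens are exactly A's tokens with the empty (final) token removed
lemma aRun_bTok (cs : List Char) (token : List Char) (h : invTok token) :
    (aRun token cs).filter (fun t => !t.isEmpty) = bTok (token ++ cs) := by
  induction cs generalizing token with
  | nil =>
    by_cases hne : token = []
    · simp [hne, aRun, bTok]
    · simp [aRun, List.filter, bTok_single h hne,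
        show (!token.isEmpty) = true by cases token <;> simp_all]
  | cons c rest ih =>
    simp only [aRun]
    by_cases h1 : c = '>'
    · subst h1
      rw [bTok_flush_gt h rest]
      have hinv : invTok [] := Or.inl rfl
      simp [ih [] hinv]
    · by_cases h2 : c = '<' ∧ token ≠ []
      · obtain ⟨hc, hne⟩ := h2
        subst hc
        rw [bTok_flush_lt h hne rest]
        have hinv : invTok ['<'] := Or.inr (by simp)
        have := ih ['<'] hinv
        simp only [List.singleton_append] at this
        simp [h1, hne, this,
          show (!token.isEmpty) = true by cases token <;> simp_all]
      · have hstep : invTok (token ++ [c]) := by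
          by_cases hc : c = '<'
          · have : token = [] := by
              by_contra hne; exact h2 ⟨hc, hne⟩
            subst this; subst hc
            exact Or.inr (by simp)
          · have hp : pchar c = true := by simp [pchar, hc, h1]
            rcases h with hh | hh
            · exact Or.inl (by simp [hh, hp])
            · refine Or.inr ⟨?_, ?_⟩
              · cases token with
                | nil => simp at hh
                | cons a l => simpa using hh.1
              · cases token with
                | nil => simp at hh
                | cons a l => simp at hh ⊢; exact ⟨hh.2, hp⟩
        have := ih (token ++ [c]) hstep
        rw [List.append_assoc] at this
        simpa [h1, h2] using this

lemma keepTok_empty : keepTok "" = false := by decide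

-- ===== VERDICT (by name: the statement is the Claim_ definition above) =====
theorem xml_tokenize_spec : Claim_equal_xml_tokenize := by
  intro xml _
  unfold Spec_xml_tokenize xml_tokenize xml_tokenize_alt
  rw [show ((xml.toList.foldl xmlStepA ([], [])).1 ++ [String.ofList (xml.toList.foldl xmlStepA ([], [])).2])
        = [] ++ (aRun [] xml.toList).map String.ofList from foldl_aRun xml.toList [] []]
  have hmain := aRun_bTok xml.toList [] (Or.inl rfl)
  rw [List.nil_append] at hmain
  rw [List.nil_append, ← hmain]
  rw [List.filter_map, List.filter_map, List.filter_filter]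
  refine congrArg _ (List.filter_congr fun t _ => ?_)
  cases t with
  | nil => simp [Function.comp, keepTok_empty]
  | cons a l => simp [Function.comp]
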